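-- pv_equiv track=rewrite | github.com/Alvaropz/Python_problems_BinarySearch | 1. Easy/number_of_unique_character_substrings/number_of_unique_character_substrings.py | number_of_unique_character_substrings
-- ===== SOURCE A (Python) =====
-- def number_of_unique_character_substrings(s):
--     if len(s) == 1:
--         return 1
--     i = 0
--     j = len(s)
--     total = 0
--     while i+1 < j:
--         if s[i] == s[i+1]:
--             temp_count = 1
--             while i+1 < j and s[i] == s[i+1]:
--                 temp_count += 1
--                 i += 1
--             i += 1
--             while temp_count > 0:
--                 total += temp_count
--                 temp_count -= 1
--         else:
--             total += 1
--             i += 1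
--     if s[-1] != s[-2]:
--         total += 1
--     return total
-- ===== SOURCE B (Python) =====
-- def number_of_unique_character_substrings(s):
--     if len(s) == 1:
--         return 1
--     prev = s[0]
--     count = 1
--     total = 0
--     for c in s[1:]:
--         if c == prev:
--             count += 1
--         else:
--             total += count * (count + 1) // 2
--             prev = c
--             count = 1
--     return total + count * (count + 1) // 2
-- ===== Notes on version B (the rewrite author's own statement) =====
-- stated objective: simpler
-- what changed: Replaces A's index-juggling nested while loops (an inner run scan plus a counting-down accumulation loop and a separate last-character fix-up) by a single forward grouping pass that adds the closed form count*(count+1)//2 per run, which also removes A's per-run counting loop and per-character indexing.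
import Mathlib
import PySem

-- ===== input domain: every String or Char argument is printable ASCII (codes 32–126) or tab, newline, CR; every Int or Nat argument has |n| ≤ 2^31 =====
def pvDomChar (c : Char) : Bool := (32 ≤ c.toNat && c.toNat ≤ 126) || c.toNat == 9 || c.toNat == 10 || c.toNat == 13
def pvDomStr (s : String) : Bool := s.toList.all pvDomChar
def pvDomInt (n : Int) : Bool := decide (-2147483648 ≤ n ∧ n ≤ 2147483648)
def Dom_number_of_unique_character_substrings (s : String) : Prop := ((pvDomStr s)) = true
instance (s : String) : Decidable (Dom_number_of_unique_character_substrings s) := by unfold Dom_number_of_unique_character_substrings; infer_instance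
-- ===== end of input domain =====

-- B replaces A's nested index-based while loops by one grouping pass with a
-- closed-form triangular term per run (objective: simpler, same return value).

-- ===== PORT A =====
-- inner `while i+1 < j and s[i] == s[i+1]: temp_count += 1; i += 1`
def pvAInner (cs : List Char) (j i : Nat) (t : Int) : Nat × Int :=
  if h : i + 1 < j ∧ cs.getD i ' ' = cs.getD (i+1) ' ' then
    pvAInner cs j (i+1) (t+1)
  else (i, t)
termination_by j - i
decreasing_by omega

-- `while temp_count > 0: total += temp_count; temp_count -= 1` (as the added amount)
def pvATri (t : Int) : Int :=
  if h : 0 < t then t + pvATri (t - 1) else 0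
termination_by t.toNat
decreasing_by omega

theorem pvAInner_le (cs : List Char) (j i : Nat) (t : Int) : i ≤ (pvAInner cs j i t).1 := by
  unfold pvAInner
  split
  · exact le_trans (by omega) (pvAInner_le cs j (i+1) (t+1))
  · exact le_refl i
termination_by j - i
decreasing_by omega

-- outer `while i+1 < j: …`
def pvAOuter (cs : List Char) (j i : Nat) (total : Int) : Int :=
  if h : i + 1 < j then
    if cs.getD i ' ' = cs.getD (i+1) ' ' then
      let p := pvAInner cs j i 1
      pvAOuter cs j (p.1 + 1) (total + pvATri p.2)
    else
      pvAOuter cs j (i+1) (total + 1)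
  else total
termination_by j - i
decreasing_by
  · have := pvAInner_le cs j i 1; omega
  · omega

def number_of_unique_character_substrings (s : String) : Int :=
  let cs := s.toList
  if cs.length == 1 then 1
  else
    let total := pvAOuter cs cs.length 0 0
    -- `if s[-1] != s[-2]: total += 1` (IndexError on the empty string → none branch, outside Pre_)
    match PySem.List.pyGet? cs (-1), PySem.List.pyGet? cs (-2) with
    | some a, some b => if a ≠ b then total + 1 else total
    | _, _ => 0

-- ===== PORT B =====
def pvBLoop (prev : Char) (count : Int) (total : Int) : List Char → Int
  | [] => total + PySem.Int.floordiv (count * (count + 1)) 2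
  | c :: rest =>
    if c = prev then pvBLoop prev (count + 1) total rest
    else pvBLoop c 1 (total + PySem.Int.floordiv (count * (count + 1)) 2) rest

def number_of_unique_character_substrings_alt (s : String) : Int :=
  let cs := s.toList
  if cs.length == 1 then 1
  else
    match cs with
    | [] => 0  -- prev = s[0] raises IndexError in Python (outside Pre_)
    | p :: rest => pvBLoop p 1 0 rest

-- ===== PRECONDITION & SPEC =====
-- Pre_ excludes only the empty string, on which A raises IndexError (s[-1]).
def Pre_number_of_unique_character_substrings (s : String) : Prop := s ≠ ""
instance (s : String) : Decidable (Pre_number_of_unique_character_substrings s) := by unfold Pre_number_of_unique_character_substrings; infer_instance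
def pvWitness_number_of_unique_character_substrings : String := "aab"

def Spec_number_of_unique_character_substrings (s : String) (out : Int) : Prop := out = number_of_unique_character_substrings_alt s
instance (s : String) (out : Int) : Decidable (Spec_number_of_unique_character_substrings s out) := by unfold Spec_number_of_unique_character_substrings; infer_instance

-- ===== CLAIM (what is proved, stated in full; the proofs are below) =====
def Claim_equal_number_of_unique_character_substrings : Prop := ∀ (s : String), Dom_number_of_unique_character_substrings s → Pre_number_of_unique_character_substrings s → Spec_number_of_unique_character_substrings s (number_of_unique_character_substrings s)

-- ===== LEMMAS AND PROOFS =====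

-- list-level mirror of A's inner loop: returns (remaining suffix, counter)
def pvAInnerL : List Char → Int → List Char × Int
  | a :: b :: r, t => if a = b then pvAInnerL (b :: r) (t + 1) else (a :: b :: r, t)
  | l, t => (l, t)

theorem pvAInnerL_len (l : List Char) (t : Int) : (pvAInnerL l t).1.length ≤ l.length := by
  induction l generalizing t with
  | nil => simp [pvAInnerL]
  | cons a r ih =>
    cases r with
    | nil => simp [pvAInnerL]
    | cons b r' =>
      by_cases hab : a = b
      · simp only [pvAInnerL, if_pos hab]
        exact le_trans (ih _) (by simp)
      · simp [pvAInnerL, hab]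

-- list-level mirror of A's outer loop
def pvAOuterL : List Char → Int → Int
  | a :: b :: r, total =>
    if a = b then
      let p := pvAInnerL (a :: b :: r) 1
      pvAOuterL p.1.tail (total + pvATri p.2)
    else pvAOuterL (b :: r) (total + 1)
  | _, total => total
termination_by l => l.length
decreasing_by
  · have h1 := pvAInnerL_len (a :: b :: r) 1
    have h2 : (pvAInnerL (a :: b :: r) 1).1.tail.length = (pvAInnerL (a :: b :: r) 1).1.length - 1 := List.length_tail
    simp only [List.length_cons] at h1 ⊢
    omega
  · simp

theorem pvATri_zero : pvATri 0 = 0 := by rw [pvATri]; simp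

theorem pvATri_one : pvATri 1 = 1 := by rw [pvATri]; simp [pvATri_zero]

theorem pvAOuterL_cons_eq (a b : Char) (r : List Char) (total : Int) (hab : a = b) :
    pvAOuterL (a :: b :: r) total
      = pvAOuterL (pvAInnerL (a :: b :: r) 1).1.tail (total + pvATri (pvAInnerL (a :: b :: r) 1).2) := by
  rw [pvAOuterL, if_pos hab]

theorem pvAOuterL_cons_ne (a b : Char) (r : List Char) (total : Int) (hab : a ≠ b) :
    pvAOuterL (a :: b :: r) total = pvAOuterL (b :: r) (total + 1) := by
  rw [pvAOuterL, if_neg hab]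

theorem pvAInner_drop (cs : List Char) (i : Nat) (t : Int) :
    pvAInnerL (cs.drop i) t = (cs.drop (pvAInner cs cs.length i t).1, (pvAInner cs cs.length i t).2) := by
  rw [pvAInner]
  split
  · next h =>
    obtain ⟨hlt, heq⟩ := h
    have h1 : i < cs.length := by omega
    have h2 : i + 1 < cs.length := hlt
    have hd1 : cs.drop i = cs[i] :: cs.drop (i+1) := (List.getElem_cons_drop h1).symm
    have hd2 : cs.drop (i+1) = cs[i+1] :: cs.drop (i+2) := (List.getElem_cons_drop h2).symm
    have hgd : cs[i] = cs[i+1] := by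
      rwa [List.getD_eq_getElem cs ' ' h1, List.getD_eq_getElem cs ' ' h2] at heq
    rw [hd1, hd2, pvAInnerL, if_pos hgd, ← hd2]
    exact pvAInner_drop cs (i+1) (t+1)
  · next h =>
    by_cases hlt : i + 1 < cs.length
    · have h1 : i < cs.length := by omega
      have hne : cs.getD i ' ' ≠ cs.getD (i+1) ' ' := by tauto
      have hgd : cs[i] ≠ cs[i+1] := by
        rwa [List.getD_eq_getElem cs ' ' h1, List.getD_eq_getElem cs ' ' hlt] at hne
      have hd1 : cs.drop i = cs[i] :: cs.drop (i+1) := (List.getElem_cons_drop h1).symm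
      have hd2 : cs.drop (i+1) = cs[i+1] :: cs.drop (i+2) := (List.getElem_cons_drop hlt).symm
      rw [hd1, hd2, pvAInnerL, if_neg hgd, ← hd2, ← hd1]
    · have hshort : (cs.drop i).length ≤ 1 := by
        simp only [List.length_drop]
        omega
      match hdi : cs.drop i with
      | [] => rw [pvAInnerL]; simp
      | [x] => rw [pvAInnerL]; simp
      | x :: y :: r =>
        rw [hdi] at hshort
        simp at hshort
termination_by cs.length - i
decreasing_by omega

theorem pvAOuter_drop (cs : List Char) (i : Nat) (total : Int) :
    pvAOuter cs cs.length i total = pvAOuterL (cs.drop i) total := by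
  rw [pvAOuter]
  split
  · next hlt =>
    have h1 : i < cs.length := by omega
    have hd1 : cs.drop i = cs[i] :: cs.drop (i+1) := (List.getElem_cons_drop h1).symm
    have hd2 : cs.drop (i+1) = cs[i+1] :: cs.drop (i+2) := (List.getElem_cons_drop hlt).symm
    have hgd1 : cs.getD i ' ' = cs[i] := List.getD_eq_getElem cs ' ' h1
    have hgd2 : cs.getD (i+1) ' ' = cs[i+1] := List.getD_eq_getElem cs ' ' hlt
    split
    · next heq =>
      have hgeq : cs[i] = cs[i+1] := by rwa [hgd1, hgd2] at heq
      have hinner := pvAInner_drop cs i 1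
      have hle := pvAInner_le cs cs.length i 1
      rw [pvAOuter_drop cs ((pvAInner cs cs.length i 1).1 + 1)]
      rw [hd1, hd2, pvAOuterL_cons_eq _ _ _ _ hgeq, ← hd2, ← hd1, hinner]
      simp only [List.tail_drop]
    · next hne =>
      have hgne : cs[i] ≠ cs[i+1] := by rwa [hgd1, hgd2] at hne
      rw [pvAOuter_drop cs (i+1)]
      rw [hd1, hd2, pvAOuterL_cons_ne _ _ _ _ hgne, ← hd2]
  · next hge =>
    have hshort : (cs.drop i).length ≤ 1 := by
      simp only [List.length_drop]
      omega
    match hdi : cs.drop i with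
    | [] => rw [pvAOuterL]; simp
    | [x] => rw [pvAOuterL]; simp
    | x :: y :: r =>
      rw [hdi] at hshort
      simp at hshort
termination_by cs.length - i
decreasing_by
  · have := pvAInner_le cs cs.length i 1; omega
  · omega

-- pvATri is the triangular closed form used by B
theorem two_mul_pvATri (n : Nat) : 2 * pvATri (n : Int) = (n : Int) * ((n : Int) + 1) := by
  induction n with
  | zero => simp [pvATri]
  | succ k ih =>
    rw [pvATri]
    rw [dif_pos (by push_cast; omega)]
    push_cast at ih ⊢
    have : ((k : Int) + 1 - 1) = (k : Int) := by ring
    rw [this]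
    nlinarith [ih]

theorem pvATri_eq (n : Nat) : pvATri (n : Int) = PySem.Int.floordiv ((n : Int) * ((n : Int) + 1)) 2 := by
  rw [PySem.Int.floordiv_eq_ediv_of_pos (by norm_num), ← two_mul_pvATri n,
    Int.mul_ediv_cancel_left _ (by norm_num)]

-- the contribution of A's final `s[-1] != s[-2]` check, read off the reversed list
def pvLastAdj (l : List Char) : Int :=
  match l.reverse with
  | a :: b :: _ => if a ≠ b then 1 else 0
  | _ => 0

theorem pvLastAdj_append_left (u l : List Char) (h : 2 ≤ l.length) :
    pvLastAdj (u ++ l) = pvLastAdj l := by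
  match hrev : l.reverse with
  | [] =>
    have hl : l.length = 0 := by have := congrArg List.length hrev; simpa using this
    exact absurd hl (by omega)
  | [a] =>
    have hl : l.length = 1 := by have := congrArg List.length hrev; simpa using this
    exact absurd hl (by omega)
  | a :: b :: t =>
    have hur : (u ++ l).reverse = a :: b :: (t ++ u.reverse) := by
      simp [List.reverse_append, hrev]
    simp only [pvLastAdj]
    rw [hur, hrev]

theorem pvLastAdj_replicate (m : Nat) (c : Char) : pvLastAdj (List.replicate m c) = 0 := by
  match m with
  | 0 => simp [pvLastAdj]
  | 1 => simp [pvLastAdj]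
  | k + 2 =>
    have : (List.replicate (k+2) c).reverse = c :: c :: List.replicate k c := by
      rw [List.reverse_replicate]; simp [List.replicate_succ]
    simp [pvLastAdj, this]

-- chunk lemmas
theorem pvAInnerL_replicate (m : Nat) (c : Char) (t : Int) :
    pvAInnerL (List.replicate (m+1) c) t = ([c], t + m) := by
  induction m generalizing t with
  | zero => simp [pvAInnerL, List.replicate_succ]
  | succ k ih =>
    rw [List.replicate_succ, List.replicate_succ]
    rw [show pvAInnerL (c :: c :: List.replicate k c) t
        = pvAInnerL (c :: List.replicate k c) (t + 1) by simp [pvAInnerL]]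
    rw [← List.replicate_succ, ih]
    simp only [Prod.mk.injEq, true_and]
    push_cast; ring

theorem pvAInnerL_replicate_ne (m : Nat) (c d : Char) (r : List Char) (t : Int) (hdc : d ≠ c) :
    pvAInnerL (List.replicate (m+1) c ++ d :: r) t = (c :: d :: r, t + m) := by
  induction m generalizing t with
  | zero =>
    simp only [List.replicate_succ, List.replicate_zero, List.nil_append, List.cons_append,
      pvAInnerL]
    rw [if_neg (Ne.symm hdc)]
    simp
  | succ k ih =>
    rw [List.replicate_succ, List.replicate_succ]
    simp only [List.cons_append, pvAInnerL, if_pos]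
    rw [show (c :: (List.replicate k c ++ d :: r)) = List.replicate (k+1) c ++ d :: r by
      simp [List.replicate_succ]]
    rw [ih]
    simp only [Prod.mk.injEq, true_and]
    push_cast; ring

theorem pvAOuterL_replicate (m : Nat) (c : Char) (total : Int) (h : 2 ≤ m) :
    pvAOuterL (List.replicate m c) total = total + pvATri m := by
  obtain ⟨k, rfl⟩ : ∃ k, m = k + 2 := ⟨m - 2, by omega⟩
  have hrep : List.replicate (k+2) c = c :: c :: List.replicate k c := by
    simp [List.replicate_succ]
  rw [hrep, pvAOuterL_cons_eq c c _ total rfl, ← hrep,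
    pvAInnerL_replicate (k+1) c 1]
  have harg : (1 : Int) + ((k : Int) + 1) = ((k : Int) + 2) := by ring
  simp only [List.tail_cons, pvAOuterL]
  push_cast
  rw [harg]

theorem pvAOuterL_chunk (m : Nat) (c d : Char) (r : List Char) (total : Int)
    (hdc : d ≠ c) : pvAOuterL (List.replicate (m+1) c ++ d :: r) total
      = pvAOuterL (d :: r) (total + pvATri (m+1)) := by
  match m with
  | 0 =>
    have hrep : List.replicate 1 c ++ d :: r = c :: d :: r := by simp
    rw [hrep, pvAOuterL_cons_ne c d r total (Ne.symm hdc)]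
    norm_num [pvATri_one]
  | k + 1 =>
    have hrep : List.replicate (k+2) c ++ d :: r = c :: c :: (List.replicate k c ++ d :: r) := by
      simp [List.replicate_succ]
    rw [hrep, pvAOuterL_cons_eq c c _ total rfl, ← hrep,
      pvAInnerL_replicate_ne (k+1) c d r 1 hdc]
    simp only [List.tail_cons]
    push_cast
    ring_nf

-- the main run-by-run correspondence
theorem pvMain (l : List Char) (c : Char) (m : Nat) (total : Int)
    (hne : ¬(l = [] ∧ m = 0)) :
    pvAOuterL (List.replicate (m+1) c ++ l) total + pvLastAdj (List.replicate (m+1) c ++ l)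
      = pvBLoop c ((m : Int) + 1) total l := by
  induction l generalizing c m total with
  | nil =>
    have hm : 1 ≤ m := by
      rcases Nat.eq_zero_or_pos m with h0 | h1
      · exact absurd ⟨rfl, h0⟩ hne
      · exact h1
    simp only [List.append_nil]
    rw [pvAOuterL_replicate (m+1) c total (by omega), pvLastAdj_replicate, pvBLoop]
    have htri := pvATri_eq (m+1)
    push_cast at htri ⊢
    rw [htri]
    ring
  | cons d r ih =>
    by_cases hdc : d = c
    · subst hdc
      have hrw : List.replicate (m+1) d ++ d :: r = List.replicate (m+2) d ++ r := by
        rw [List.replicate_succ' (n := m+1)]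
        simp
      rw [hrw, pvBLoop, if_pos rfl]
      have := ih d (m+1) total (by simp)
      push_cast at this ⊢
      convert this using 3
    · cases r with
      | nil =>
        rw [pvAOuterL_chunk m c d [] total hdc]
        have hout : pvAOuterL [d] (total + pvATri ((m : Int)+1)) = total + pvATri ((m : Int)+1) := by
          rw [pvAOuterL]
          simp
        have hadj : pvLastAdj (List.replicate (m+1) c ++ [d]) = 1 := by
          have hrev : (List.replicate (m+1) c ++ [d]).reverse = d :: c :: List.replicate m c := by
            rw [List.reverse_append, List.reverse_replicate]
            simp [List.replicate_succ]
          simp only [pvLastAdj]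
          rw [hrev]
          simp [hdc]
        rw [hout, hadj]
        simp only [pvBLoop, if_neg hdc]
        have htri := pvATri_eq (m+1)
        have h1 : PySem.Int.floordiv 2 2 = 1 := by decide
        push_cast at htri ⊢
        rw [htri, h1]
      | cons e r' =>
        rw [pvAOuterL_chunk m c d (e :: r') total hdc]
        rw [pvLastAdj_append_left (List.replicate (m+1) c) (d :: e :: r') (by simp)]
        rw [pvBLoop, if_neg hdc]
        have := ih d 0 (total + pvATri ((m : Int) + 1)) (by simp)
        simp only [Nat.cast_zero, zero_add] at this
        have hrep1 : List.replicate (0+1) d ++ e :: r' = d :: e :: r' := by simp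
        rw [hrep1] at this
        rw [this]
        have htri := pvATri_eq (m+1)
        push_cast at htri ⊢
        rw [htri]

-- ===== VERDICT (by name: the statement is the Claim_ definition above) =====
theorem number_of_unique_character_substrings_spec : Claim_equal_number_of_unique_character_substrings := by
  intro s _hdom hpre
  show number_of_unique_character_substrings s = number_of_unique_character_substrings_alt s
  unfold number_of_unique_character_substrings number_of_unique_character_substrings_alt
  have hcs : s.toList ≠ [] := by
    intro h
    rw [String.toList_eq_nil_iff] at h
    exact hpre h
  by_cases hlen : s.toList.length = 1
  · simp [hlen]
  · simp only [beq_iff_eq, if_neg hlen]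
    match hmt : s.toList with
    | [] => exact absurd hmt hcs
    | [p] => rw [hmt] at hlen; simp at hlen
    | p :: q :: rest' =>
      have hlen2 : 2 ≤ (p :: q :: rest').length := by simp
      have hrevlen : 2 ≤ (p :: q :: rest').reverse.length := by simp
      match hrev : (p :: q :: rest').reverse with
      | [] => rw [hrev] at hrevlen; simp at hrevlen
      | [a] => rw [hrev] at hrevlen; simp at hrevlen
      | a :: b :: t =>
        have hcseq : p :: q :: rest' = t.reverse ++ [b, a] := by
          have h2 := congrArg List.reverse hrev
          simpa using h2
        have ha : PySem.List.pyGet? (p :: q :: rest') (-1) = some a := by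
          rw [PySem.List.pyGet?_neg_one, List.getLast?_eq_head?_reverse, hrev]
          rfl
        have hb : PySem.List.pyGet? (p :: q :: rest') (-2) = some b := by
          rw [PySem.List.pyGet?_neg_ofNat _ 2 (by norm_num) (by simp)]
          rw [hcseq]
          have hL : (t.reverse ++ [b, a]).length - 2 = t.reverse.length := by simp
          rw [hL, List.getElem?_append_right (le_refl _)]
          simp
        rw [ha, hb]
        have htot : pvAOuter (p :: q :: rest') (p :: q :: rest').length 0 0
            = pvAOuterL (p :: q :: rest') 0 := by
          have := pvAOuter_drop (p :: q :: rest') 0 0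
          simpa using this
        have hmain := pvMain (q :: rest') p 0 0 (by simp)
        simp only [Nat.cast_zero, zero_add] at hmain
        rw [show List.replicate (0+1) p ++ q :: rest' = p :: q :: rest' by simp] at hmain
        have hadj : pvLastAdj (p :: q :: rest') = if a ≠ b then 1 else 0 := by
          simp only [pvLastAdj]
          rw [hrev]
        rw [htot]
        by_cases hab : a = b
        · simp only [hab, ne_eq, not_true_eq_false, if_false]
          rw [← hmain, hadj]
          simp [hab]
        · simp only [ne_eq, hab, not_false_eq_true, if_true]
          rw [← hmain, hadj]
          simp [hab]
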